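-- pv_equiv track=rewrite | github.com/ananyasingh2307/Lab_Task4 | Stack_Operation.py | undo_operations
-- ===== SOURCE A (Python) =====
-- def undo_operations(operations):
--     stack = []
--     for op in operations:
--         if op == "UNDO":
--             if stack:
--                 stack.pop()
--         else:
--             stack.append(op)
--     return "".join(stack)
-- ===== SOURCE B (Python) =====
-- def undo_operations(operations):
--     skip = 0
--     survivors = []
--     for op in reversed(operations):
--         if op == "UNDO":
--             skip += 1
--         elif skip > 0:
--             skip -= 1
--         else:
--             survivors.append(op)
--     survivors.reverse()
--     return "".join(survivors)
-- ===== Notes on version B (the rewrite author's own statement) =====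
-- stated objective: alternative
-- what changed: Replaces the forward stack simulation (append/pop) by a single backward pass that keeps only an integer counter of pending undos and collects surviving ops in reverse.
import Mathlib
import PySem

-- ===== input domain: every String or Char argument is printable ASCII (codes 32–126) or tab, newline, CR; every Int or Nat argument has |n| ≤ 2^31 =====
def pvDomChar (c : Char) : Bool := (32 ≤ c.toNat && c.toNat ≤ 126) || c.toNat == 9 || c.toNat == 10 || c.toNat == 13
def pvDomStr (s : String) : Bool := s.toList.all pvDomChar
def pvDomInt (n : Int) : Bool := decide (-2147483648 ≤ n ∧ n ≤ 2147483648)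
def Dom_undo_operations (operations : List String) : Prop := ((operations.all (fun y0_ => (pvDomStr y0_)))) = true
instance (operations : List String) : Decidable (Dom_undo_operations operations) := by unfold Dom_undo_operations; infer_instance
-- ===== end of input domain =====

-- B replaces A's forward stack simulation by one backward pass with a pending-undo counter; alternative decomposition, same cost.

-- ===== PORT A =====
-- one loop step of A: pop on "UNDO" (no-op on empty stack), else push
def pvA_step (stack : List String) (op : String) : List String :=
  if op == "UNDO" then (if stack.isEmpty then stack else stack.dropLast)
  else stack ++ [op]

def undo_operations (operations : List String) : String :=
  PySem.Str.join "" (operations.foldl pvA_step [])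

-- ===== PORT B =====
-- one loop step of B over reversed(operations): state = (skip counter, survivors in reverse order)
def pvB_step (st : Nat × List String) (op : String) : Nat × List String :=
  if op == "UNDO" then (st.1 + 1, st.2)
  else if st.1 > 0 then (st.1 - 1, st.2)
  else (st.1, st.2 ++ [op])

def undo_operations_alt (operations : List String) : String :=
  PySem.Str.join "" ((operations.reverse.foldl pvB_step (0, [])).2.reverse)

-- ===== PRECONDITION & SPEC =====
def Spec_undo_operations (operations : List String) (out : String) : Prop := out = undo_operations_alt operations
instance (operations : List String) (out : String) : Decidable (Spec_undo_operations operations out) := by unfold Spec_undo_operations; infer_instance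

-- ===== CLAIM (what is proved, stated in full; the proofs are below) =====
def Claim_equal_undo_operations : Prop := ∀ (operations : List String), Dom_undo_operations operations → Spec_undo_operations operations (undo_operations operations)

-- ===== LEMMAS AND PROOFS =====

-- invariant: B's backward fold over rops, from state (skip, acc), yields (after the final
-- reverse) A's stack for rops.reverse with its last `skip` elements dropped, followed by acc.reverse
theorem pv_inv (rops : List String) (skip : Nat) (acc : List String) :
    (rops.foldl pvB_step (skip, acc)).2.reverse =
      (rops.reverse.foldl pvA_step []).take ((rops.reverse.foldl pvA_step []).length - skip)
        ++ acc.reverse := by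
  induction rops generalizing skip acc with
  | nil => simp
  | cons x rops ih =>
    have hA : (x :: rops).reverse.foldl pvA_step [] =
        pvA_step (rops.reverse.foldl pvA_step []) x := by
      simp [List.foldl_append]
    set L := rops.reverse.foldl pvA_step [] with hL
    simp only [List.foldl_cons, hA]
    by_cases hx : x = "UNDO"
    · -- UNDO: skip grows by one; A pops (or no-op on empty)
      subst hx
      rw [show pvB_step (skip, acc) "UNDO" = (skip + 1, acc) from by simp [pvB_step]]
      rw [ih]
      by_cases hL0 : L.isEmpty
      · simp [pvA_step, List.isEmpty_iff.mp hL0]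
      · have hlen : 1 ≤ L.length := by
          have : L ≠ [] := by simpa using hL0
          exact List.length_pos_of_ne_nil this
        simp only [pvA_step, beq_self_eq_true, if_true, if_neg hL0,
          List.dropLast_eq_take, List.length_take, List.take_take]
        have hmin : min (min (L.length - 1) L.length - skip) (L.length - 1)
            = L.length - (skip + 1) := by omega
        rw [hmin]
    · -- push op
      rw [show pvB_step (skip, acc) x = (if skip > 0 then (skip - 1, acc) else (skip, acc ++ [x]))
          from by simp [pvB_step, hx]]
      have hAx : pvA_step L x = L ++ [x] := by simp [pvA_step, hx]
      rw [hAx]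
      by_cases hs : skip > 0
      · rw [if_pos hs, ih]
        rw [List.take_append_of_le_length (by simp; omega)]
        congr 2
        simp; omega
      · rw [if_neg hs, ih]
        have hs0 : skip = 0 := by omega
        subst hs0
        simp [List.take_append]

-- ===== VERDICT (by name: the statement is the Claim_ definition above) =====
theorem undo_operations_spec : Claim_equal_undo_operations := by
  intro operations _
  unfold Spec_undo_operations undo_operations undo_operations_alt
  rw [pv_inv]
  simp
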